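-- pv_equiv track=rewrite | github.com/lenashamseldinsw/mystery-shopper-ai | report_utils.py | parse_sections_from_text
-- ===== SOURCE A (Python) =====
-- def parse_sections_from_text(text):
--     sections = {}
--     current = None
--     buff = []
--
--     for line in text.split("\n"):
--         if line.startswith("==="):
--             if current:
--                 sections[current] = "\n".join(buff).strip()
--             current = line.replace("=", "").strip()
--             buff = []
--         else:
--             buff.append(line)
--
--     if current:
--         sections[current] = "\n".join(buff).strip()
--
--     return sections
-- ===== SOURCE B (Python) =====
-- def parse_sections_from_text(text):
--     # Block-scanning: find each header line by index, then slice out its body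
--     # in one step, instead of streaming lines into a buffer.
--     lines = text.split("\n")
--     n = len(lines)
--     sections = {}
--     i = 0
--     while i < n and not lines[i].startswith("==="):
--         i += 1
--     while i < n:
--         name = lines[i].replace("=", "").strip()
--         j = i + 1
--         while j < n and not lines[j].startswith("==="):
--             j += 1
--         if name:
--             sections[name] = "\n".join(lines[i + 1 : j]).strip()
--         i = j
--     return sections
-- ===== Notes on version B (the rewrite author's own statement) =====
-- stated objective: alternative
-- what changed: Replaces A's streaming current/buff accumulator with index-based block scanning: locate each '===' header line, scan forward to the next header, and slice the body out of the line list in one step.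
import Mathlib
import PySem

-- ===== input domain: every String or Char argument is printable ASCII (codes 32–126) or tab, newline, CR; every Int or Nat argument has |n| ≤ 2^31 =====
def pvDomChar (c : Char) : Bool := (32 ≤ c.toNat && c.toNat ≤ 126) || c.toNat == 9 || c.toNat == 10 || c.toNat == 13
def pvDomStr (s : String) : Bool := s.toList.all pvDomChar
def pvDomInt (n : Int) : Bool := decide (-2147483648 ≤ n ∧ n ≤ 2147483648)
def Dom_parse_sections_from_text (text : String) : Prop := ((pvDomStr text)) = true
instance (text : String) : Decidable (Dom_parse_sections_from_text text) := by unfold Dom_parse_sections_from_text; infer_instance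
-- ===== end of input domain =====

-- B replaces A's streaming current/buffer accumulator with index-based block scanning
-- over the line list (an alternative decomposition, not claimed faster).


-- ===== PORT A =====
-- the trailing `if current: sections[current] = "\n".join(buff).strip()` block of A
-- (also reused for the identical in-loop flush)
def pvFinish (st : PySem.Dict String String × Option String × List String) :
    PySem.Dict String String :=
  match st with
  | (sections, some c, buff) =>
      if c ≠ "" then sections.insert c (PySem.Str.strip (PySem.Str.join "\n" buff)) else sections
  | (sections, none, _) => sections

def pvStepA (st : PySem.Dict String String × Option String × List String) (line : String) :
    PySem.Dict String String × Option String × List String :=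
  if PySem.Str.startswith line "===" then
    (pvFinish st, some (PySem.Str.strip (PySem.Str.replace line "=" "")), [])
  else
    (st.1, st.2.1, st.2.2 ++ [line])

def parse_sections_from_text (text : String) : List (String × String) :=
  -- text.split("\n"): split? is none only for sep = "", so getD [] is exact here
  let lines := (PySem.Str.split? text "\n").getD []
  (pvFinish (lines.foldl pvStepA (PySem.Dict.empty, none, []))).items

-- ===== PORT B =====
def pvIsHeader (l : String) : Bool := PySem.Str.startswith l "==="

-- the `while _ < n and not lines[_].startswith("===")` scanning loops of B
def pvScan (lines : List String) (j : Nat) : Nat :=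
  if h : j < lines.length then
    if pvIsHeader lines[j] then j else pvScan lines (j + 1)
  else j
termination_by lines.length - j

theorem pvScan_ge (lines : List String) (j : Nat) : j ≤ pvScan lines j := by
  unfold pvScan
  split
  · split
    · exact le_refl _
    · have := pvScan_ge lines (j + 1); omega
  · exact le_refl _
termination_by lines.length - j

-- the outer `while i < n` loop of B
def pvAltLoop (lines : List String) (i : Nat) (sections : PySem.Dict String String) :
    PySem.Dict String String :=
  if h : i < lines.length then
    let name := PySem.Str.strip (PySem.Str.replace lines[i] "=" "")
    let j := pvScan lines (i + 1)
    let sections :=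
      if name ≠ "" then
        sections.insert name
          (PySem.Str.strip (PySem.Str.join "\n"
            (PySem.List.slice lines (some ((i : Int) + 1)) (some (j : Int)))))
      else sections
    pvAltLoop lines j sections
  else sections
termination_by lines.length - i
decreasing_by have := pvScan_ge lines (i + 1); omega

def parse_sections_from_text_alt (text : String) : List (String × String) :=
  let lines := (PySem.Str.split? text "\n").getD []
  (pvAltLoop lines (pvScan lines 0) PySem.Dict.empty).items

-- ===== PRECONDITION & SPEC =====
def Spec_parse_sections_from_text (text : String) (out : List (String × String)) : Prop := out = parse_sections_from_text_alt text
instance (text : String) (out : List (String × String)) : Decidable (Spec_parse_sections_from_text text out) := by unfold Spec_parse_sections_from_text; infer_instance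

-- ===== CLAIM (what is proved, stated in full; the proofs are below) =====
def Claim_equal_parse_sections_from_text : Prop := ∀ (text : String), Dom_parse_sections_from_text text → Spec_parse_sections_from_text text (parse_sections_from_text text)

-- ===== LEMMAS AND PROOFS =====

def pvNotHeader (x : String) : Bool := !pvIsHeader x

-- common specification of both programs: structural recursion over header-delimited blocks
def pvSpecGo : List String → PySem.Dict String String → PySem.Dict String String
  | [], d => d
  | l :: rest, d =>
    if pvIsHeader l then
      let name := PySem.Str.strip (PySem.Str.replace l "=" "")
      let d' := if name ≠ "" then
          d.insert name (PySem.Str.strip (PySem.Str.join "\n" (rest.takeWhile pvNotHeader)))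
        else d
      pvSpecGo (rest.dropWhile pvNotHeader) d'
    else pvSpecGo rest d
termination_by ls => ls.length
decreasing_by
  · have := List.length_dropWhile_le pvNotHeader rest; simp; omega
  · simp

def pvInsertIf (d : PySem.Dict String String) (c v : String) : PySem.Dict String String :=
  if c ≠ "" then d.insert c v else d

theorem pvSpecGo_cons_header (l : String) (rest : List String) (d : PySem.Dict String String)
    (hl : pvIsHeader l = true) :
    pvSpecGo (l :: rest) d =
      pvSpecGo (rest.dropWhile pvNotHeader)
        (pvInsertIf d (PySem.Str.strip (PySem.Str.replace l "=" ""))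
          (PySem.Str.strip (PySem.Str.join "\n" (rest.takeWhile pvNotHeader)))) := by
  rw [pvSpecGo]
  simp only [hl, reduceIte, pvInsertIf]

theorem pvFoldA_some (lines : List String) (d : PySem.Dict String String) (c : String)
    (buff : List String) :
    pvFinish (lines.foldl pvStepA (d, some c, buff)) =
    pvSpecGo (lines.dropWhile pvNotHeader)
      (pvInsertIf d c (PySem.Str.strip (PySem.Str.join "\n"
        (buff ++ lines.takeWhile pvNotHeader)))) := by
  induction lines generalizing d c buff with
  | nil => simp [pvFinish, pvSpecGo, pvInsertIf]
  | cons l rest ih =>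
    by_cases hl : pvIsHeader l = true
    · have hl' : PySem.Str.startswith l "===" = true := hl
      have hp : pvNotHeader l = false := by simp [pvNotHeader, hl]
      simp only [List.foldl_cons, pvStepA]
      rw [if_pos hl']
      rw [ih]
      rw [List.dropWhile_cons, List.takeWhile_cons]
      simp only [hp, Bool.false_eq_true, reduceIte, List.append_nil, List.nil_append]
      rw [pvSpecGo_cons_header l rest _ hl]
      have hfin : pvFinish (d, some c, buff) =
          pvInsertIf d c (PySem.Str.strip (PySem.Str.join "\n" buff)) := by
        simp [pvFinish, pvInsertIf]
      rw [hfin]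
    · have hl' : ¬ PySem.Str.startswith l "===" = true := hl
      have hp : pvNotHeader l = true := by simp [pvNotHeader, hl]
      simp only [List.foldl_cons, pvStepA]
      rw [if_neg hl']
      rw [ih]
      rw [List.dropWhile_cons, List.takeWhile_cons]
      simp only [hp, reduceIte]
      simp

theorem pvFoldA_none (lines : List String) (d : PySem.Dict String String)
    (buff : List String) :
    pvFinish (lines.foldl pvStepA (d, none, buff)) =
    pvSpecGo (lines.dropWhile pvNotHeader) d := by
  induction lines generalizing buff with
  | nil => simp [pvFinish, pvSpecGo]
  | cons l rest ih =>
    by_cases hl : pvIsHeader l = true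
    · have hl' : PySem.Str.startswith l "===" = true := hl
      have hp : pvNotHeader l = false := by simp [pvNotHeader, hl]
      simp only [List.foldl_cons, pvStepA]
      rw [if_pos hl']
      rw [show pvFinish (d, none, buff) = d from rfl]
      rw [pvFoldA_some]
      rw [List.dropWhile_cons]
      simp only [hp, Bool.false_eq_true, reduceIte]
      rw [pvSpecGo_cons_header l rest _ hl]
      simp
    · have hl' : ¬ PySem.Str.startswith l "===" = true := hl
      have hp : pvNotHeader l = true := by simp [pvNotHeader, hl]
      simp only [List.foldl_cons, pvStepA]
      rw [if_neg hl']
      rw [ih]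
      rw [List.dropWhile_cons]
      simp only [hp, reduceIte]

theorem pvScan_drop (lines : List String) (j : Nat) :
    lines.drop (pvScan lines j) = (lines.drop j).dropWhile pvNotHeader := by
  unfold pvScan
  split
  · next h =>
    split
    · next hh =>
      rw [List.drop_eq_getElem_cons h, List.dropWhile_cons]
      simp [pvNotHeader, hh]
    · next hh =>
      rw [pvScan_drop lines (j + 1)]
      conv_rhs => rw [List.drop_eq_getElem_cons h]
      rw [List.dropWhile_cons]
      simp [pvNotHeader, hh]
  · next h =>
    have : lines.length ≤ j := by omega
    simp [List.drop_eq_nil_of_le this]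
termination_by lines.length - j

theorem pvScan_take (lines : List String) (j : Nat) :
    (lines.drop j).takeWhile pvNotHeader = (lines.drop j).take (pvScan lines j - j) := by
  unfold pvScan
  split
  · next h =>
    split
    · next hh =>
      rw [List.drop_eq_getElem_cons h]
      simp [List.takeWhile_cons, pvNotHeader, hh]
    · next hh =>
      have hge := pvScan_ge lines (j + 1)
      rw [List.drop_eq_getElem_cons h]
      rw [show pvScan lines (j + 1) - j = (pvScan lines (j + 1) - (j + 1)) + 1 from by omega]
      rw [List.take_succ_cons]
      rw [List.takeWhile_cons]
      rw [show pvNotHeader lines[j] = true from by simp [pvNotHeader, hh]]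
      simp only [reduceIte]
      rw [pvScan_take lines (j + 1)]
  · next h =>
    have : lines.length ≤ j := by omega
    simp [List.drop_eq_nil_of_le this]
termination_by lines.length - j

theorem pvScan_inv (lines : List String) (j : Nat) :
    lines.length ≤ pvScan lines j ∨
      ∃ h : pvScan lines j < lines.length, pvIsHeader lines[pvScan lines j] := by
  unfold pvScan
  split
  · next h =>
    split
    · next hh => exact Or.inr ⟨h, hh⟩
    · exact pvScan_inv lines (j + 1)
  · next h => left; omega
termination_by lines.length - j

theorem pvAltLoop_step (lines : List String) (i : Nat) (d : PySem.Dict String String)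
    (h : i < lines.length) :
    pvAltLoop lines i d =
      pvAltLoop lines (pvScan lines (i + 1))
        (if PySem.Str.strip (PySem.Str.replace lines[i] "=" "") ≠ "" then
          d.insert (PySem.Str.strip (PySem.Str.replace lines[i] "=" ""))
            (PySem.Str.strip (PySem.Str.join "\n"
              (PySem.List.slice lines (some ((i : Int) + 1)) (some ((pvScan lines (i + 1) : Nat) : Int)))))
        else d) := by
  rw [pvAltLoop, dif_pos h]

set_option maxHeartbeats 1600000 in
theorem pvAltLoop_spec_aux (fuel : Nat) :
    ∀ (lines : List String) (i : Nat) (d : PySem.Dict String String),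
      lines.length - i ≤ fuel →
      (lines.length ≤ i ∨ ∃ h : i < lines.length, pvIsHeader lines[i]) →
      pvAltLoop lines i d = pvSpecGo (lines.drop i) d := by
  induction fuel with
  | zero =>
    intro lines i d hfuel _
    have hge : lines.length ≤ i := by omega
    unfold pvAltLoop
    rw [dif_neg (by omega)]
    rw [List.drop_eq_nil_of_le hge, pvSpecGo]
  | succ n ihf =>
    intro lines i d hfuel hinv
    by_cases h : i < lines.length
    · obtain hle | ⟨_, hh⟩ := hinv
      · omega
      · refine Eq.trans (pvAltLoop_step lines i d h) ?_
        refine Eq.trans (ihf lines (pvScan lines (i + 1)) _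
          (by have := pvScan_ge lines (i + 1); omega) (pvScan_inv lines (i + 1))) ?_
        have hs2 : PySem.List.slice lines (some ((i : Int) + 1))
              (some ((pvScan lines (i + 1) : Nat) : Int))
            = (lines.drop (i + 1)).takeWhile pvNotHeader := by
          rw [show ((i : Int) + 1) = (((i + 1 : Nat)) : Int) from by push_cast; ring]
          rw [PySem.List.slice_natCast, ← pvScan_take lines (i + 1)]
        have hs1 := pvScan_drop lines (i + 1)
        conv_lhs => rw [hs2, hs1]
        conv_rhs => rw [List.drop_eq_getElem_cons h]
        rw [pvSpecGo_cons_header _ _ _ hh]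
        rw [pvInsertIf]
    · unfold pvAltLoop
      rw [dif_neg h]
      rw [List.drop_eq_nil_of_le (by omega), pvSpecGo]

theorem pvAltLoop_spec (lines : List String) (i : Nat) (d : PySem.Dict String String)
    (hinv : lines.length ≤ i ∨ ∃ h : i < lines.length, pvIsHeader lines[i]) :
    pvAltLoop lines i d = pvSpecGo (lines.drop i) d :=
  pvAltLoop_spec_aux (lines.length - i) lines i d (le_refl _) hinv

-- ===== VERDICT (by name: the statement is the Claim_ definition above) =====
theorem parse_sections_from_text_spec : Claim_equal_parse_sections_from_text := by
  intro text _
  unfold Spec_parse_sections_from_text parse_sections_from_text parse_sections_from_text_alt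
  simp only
  rw [pvAltLoop_spec _ _ _ (pvScan_inv _ 0), pvScan_drop, List.drop_zero, pvFoldA_none]
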